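-- pv_equiv track=rewrite | github.com/simadorin/Exercises | Permutation.py | solution
-- ===== SOURCE A (Python) =====
-- def solution(A):
--     sum1 = 0
--     for i in range(0,len(A)+1):
--         sum1 = sum1+i
--     if sum1 == sum(A):
--         return 1
--     else:
--         return 0
-- ===== SOURCE B (Python) =====
-- def solution(A):
--     n = len(A)
--     return 1 if n * (n + 1) // 2 == sum(A) else 0
-- ===== Notes on version B (the rewrite author's own statement) =====
-- stated objective: simpler
-- what changed: Replaces the O(n) accumulation loop for the triangular number with the closed-form n*(n+1)//2 compared directly to sum(A).
import Mathlib
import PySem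

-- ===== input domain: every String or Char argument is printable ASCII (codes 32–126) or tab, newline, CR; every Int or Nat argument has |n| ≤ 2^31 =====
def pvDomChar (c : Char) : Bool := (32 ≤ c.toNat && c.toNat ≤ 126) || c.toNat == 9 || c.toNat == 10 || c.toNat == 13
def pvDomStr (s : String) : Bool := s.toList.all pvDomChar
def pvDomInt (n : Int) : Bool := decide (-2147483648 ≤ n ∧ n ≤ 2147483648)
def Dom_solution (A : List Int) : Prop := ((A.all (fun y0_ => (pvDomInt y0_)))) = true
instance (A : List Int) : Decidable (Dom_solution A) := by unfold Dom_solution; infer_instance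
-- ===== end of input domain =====

-- ===== PORT A =====
def solution (A : List Int) : Int :=
  let sum1 := (PySem.List.pyRange 0 ((A.length : Int) + 1) 1).foldl (fun s i => s + i) 0
  if sum1 = A.sum then 1 else 0

-- ===== PORT B =====
-- B: closed-form triangular number n*(n+1)//2 instead of the accumulation loop.
def solution_alt (A : List Int) : Int :=
  let n : Int := A.length
  if PySem.Int.floordiv (n * (n + 1)) 2 = A.sum then 1 else 0

-- ===== PRECONDITION & SPEC =====
def Spec_solution (A : List Int) (out : Int) : Prop := out = solution_alt A
instance (A : List Int) (out : Int) : Decidable (Spec_solution A out) := by unfold Spec_solution; infer_instance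

-- ===== CLAIM (what is proved, stated in full; the proofs are below) =====
def Claim_equal_solution : Prop := ∀ (A : List Int), Dom_solution A → Spec_solution A (solution A)

-- ===== LEMMAS AND PROOFS =====

-- ===== VERDICT (by name: the statement is the Claim_ definition above) =====
-- the loop of A sums 0..m, twice which is m*(m+1)
lemma two_mul_loopsum (m : Nat) :
    2 * (PySem.List.pyRange 0 ((m : Int) + 1) 1).foldl (fun s i => s + i) 0
      = (m : Int) * ((m : Int) + 1) := by
  induction m with
  | zero => decide
  | succ k ih =>
    have h : ((k : Int) + 1) + 1 = (((k + 1 : Nat) : Int)) + 1 := by push_cast; ring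
    rw [show (((k + 1 : Nat) : Int) + 1) = ((k : Int) + 1) + 1 by push_cast; ring,
        PySem.List.pyRange_one_succ_right (by positivity), List.foldl_append]
    simp only [List.foldl]
    push_cast
    nlinarith [ih]

lemma loopsum_eq_floordiv (m : Nat) :
    (PySem.List.pyRange 0 ((m : Int) + 1) 1).foldl (fun s i => s + i) 0
      = PySem.Int.floordiv ((m : Int) * ((m : Int) + 1)) 2 := by
  rw [PySem.Int.floordiv_eq_ediv_of_pos (by norm_num), ← two_mul_loopsum m,
      Int.mul_ediv_cancel_left _ (by norm_num)]

theorem solution_spec : Claim_equal_solution := by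
  intro A _
  unfold Spec_solution solution solution_alt
  simp only [loopsum_eq_floordiv A.length]
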